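-- pv_equiv track=rewrite | github.com/yvlaere/yvl-chess | python_notebooks/move_generation.py | get_knight_attack
-- ===== SOURCE A (Python) =====
-- def get_knight_attack(position):
--     """
--     returns a bitboard with all the possible knight moves starting from the given position
--     position: an integer (0-63) that gives the position of the knight.
--     """
--
--     # turn the position into a bitboard
--     position_bb = 0
--     position_bb |= 1 << position
--
--     # positions for knight moves
--     # these indicate what the possible positions of a knight are relative to a given position (input)
--     knight_moves = [10, 17, 15, 6, -10, -17, -15, -6]
--
--     # initialize bitboard
--     attack_bb = 0
--     # loop over the knight moves and add the corresponding squares to the bitboard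
--     for move in knight_moves:
--         destination = position + move
--         # turn the move into a bitboard
--         # check for rankwise (rowwise) errors by checking if the destination is 0-63
--         if destination >= 0 and destination < 64:
--             # initialize temporary destination bitboard
--             destination_bb = 0
--             destination_bb |= 1 << destination
--             # check for filewise (columnwise) errors
--             # the first operation determines if the knight is on the A or B file (position_bb & 0x0303030303030303) or on the G or H file (position_bb & 0xC0C0C0C0C0C0C0C0)
--             # so this: (position_bb & 0x0303030303030303) != 0 is true if the knight is on the A or B file
--             # the second operation check if the destination is on the G or H file (dest_bb & 0xC0C0C0C0C0C0C0C0) or on the A or B file (dest_bb & 0x0303030303030303) to see if the knight crossed the board borders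
--             if not ((position_bb & 0x0303030303030303) != 0 and (destination_bb & 0xC0C0C0C0C0C0C0C0) != 0) and                not ((position_bb & 0xC0C0C0C0C0C0C0C0) != 0 and (destination_bb & 0x0303030303030303) != 0):
--                 # if the move is valid, set the corresponding bit in the bitboard
--                 attack_bb |= 1 << destination
--     return attack_bb
-- ===== SOURCE B (Python) =====
-- # B: precompute a 64-entry knight-attack table once (from (row,col) coordinates),
-- # then each call is a single table lookup (alternative structure, similar cost).
-- _DELTAS = ((2, 1), (2, -1), (-2, 1), (-2, -1), (1, 2), (1, -2), (-1, 2), (-1, -2))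
--
-- def _attacks_from(sq):
--     r, c = divmod(sq, 8)
--     bb = 0
--     for dr, dc in _DELTAS:
--         nr, nc = r + dr, c + dc
--         if 0 <= nr < 8 and 0 <= nc < 8:
--             bb |= 1 << (nr * 8 + nc)
--     return bb
--
-- _KNIGHT_ATTACKS = [_attacks_from(sq) for sq in range(64)]
--
-- def get_knight_attack(position):
--     return _KNIGHT_ATTACKS[position] if 0 <= position < 64 else 0
-- ===== Notes on version B (the rewrite author's own statement) =====
-- stated objective: alternative
-- what changed: B precomputes a 64-entry attack table from (row,col) coordinate deltas once and answers each call by a bounds-guarded table lookup, replacing A's per-call loop over eight offsets with shift/file-mask wrap detection.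
-- intended difference: For positions 64-80 (outside the 0-63 board) A's range test still lets some offsets through and it returns a nonzero garbage bitboard, while B returns 0 (no attacks from an off-board square), which is the intended value for an out-of-range input. — e.g. on get_knight_attack(72): A returns 4791830003522207744, B returns 0
import Mathlib
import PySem

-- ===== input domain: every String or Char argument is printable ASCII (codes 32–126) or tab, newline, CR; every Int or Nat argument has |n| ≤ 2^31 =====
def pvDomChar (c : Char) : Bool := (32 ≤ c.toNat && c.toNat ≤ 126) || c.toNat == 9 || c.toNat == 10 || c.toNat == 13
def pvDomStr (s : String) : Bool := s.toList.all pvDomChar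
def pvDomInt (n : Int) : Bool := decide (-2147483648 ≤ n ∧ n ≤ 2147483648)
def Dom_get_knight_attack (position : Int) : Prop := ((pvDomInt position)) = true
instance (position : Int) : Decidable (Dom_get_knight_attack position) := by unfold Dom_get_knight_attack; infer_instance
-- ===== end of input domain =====

-- B replaces A's per-call offset loop with file-mask wrap detection by a 64-entry
-- attack table precomputed from (row,col) coordinate deltas, looked up per call.

-- ===== PORT A =====
-- knight_moves = [10, 17, 15, 6, -10, -17, -15, -6]
def knightMovesA : List Int := [10, 17, 15, 6, -10, -17, -15, -6]

-- literal port of A; '1 << n' is '1 <<< n.toNat' (exact for n ≥ 0; Python raises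
-- for negative shift counts, which Pre_ excludes)
def get_knight_attack (position : Int) : Int :=
  let position_bb : Int := PySem.Int.bor 0 ((1 : Int) <<< position.toNat)
  List.foldl (fun attack_bb move =>
    let destination := position + move
    if 0 ≤ destination ∧ destination < 64 then
      let destination_bb : Int := PySem.Int.bor 0 ((1 : Int) <<< destination.toNat)
      if ¬(PySem.Int.band position_bb 0x0303030303030303 ≠ 0 ∧
            PySem.Int.band destination_bb 0xC0C0C0C0C0C0C0C0 ≠ 0) ∧
         ¬(PySem.Int.band position_bb 0xC0C0C0C0C0C0C0C0 ≠ 0 ∧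
            PySem.Int.band destination_bb 0x0303030303030303 ≠ 0) then
        PySem.Int.bor attack_bb ((1 : Int) <<< destination.toNat)
      else attack_bb
    else attack_bb) 0 knightMovesA

-- ===== PORT B =====
def knightDeltas : List (Int × Int) :=
  [(2, 1), (2, -1), (-2, 1), (-2, -1), (1, 2), (1, -2), (-1, 2), (-1, -2)]

def attacksFrom (sq : Int) : Int :=
  let r := PySem.Int.floordiv sq 8
  let c := PySem.Int.mod sq 8
  List.foldl (fun bb d =>
    let nr := r + d.1
    let nc := c + d.2
    if 0 ≤ nr ∧ nr < 8 ∧ 0 ≤ nc ∧ nc < 8 then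
      PySem.Int.bor bb ((1 : Int) <<< (nr * 8 + nc).toNat)
    else bb) 0 knightDeltas

def knightTable : List Int := (PySem.List.pyRange 0 64 1).map attacksFrom

def get_knight_attack_alt (position : Int) : Int :=
  if 0 ≤ position ∧ position < 64 then
    (PySem.List.pyGet? knightTable position).getD 0  -- guard makes the index in range
  else 0

-- ===== PRECONDITION & SPEC =====
-- A raises ValueError ('negative shift count') for position < 0; excluded.
def Pre_get_knight_attack (position : Int) : Prop := 0 ≤ position
instance (position : Int) : Decidable (Pre_get_knight_attack position) := by
  unfold Pre_get_knight_attack; infer_instance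

def pvWitness_get_knight_attack : Int := 28

-- For positions 64-80 (outside the 0-63 board) A's range test still lets some offsets
-- through and it returns a nonzero garbage bitboard, while B returns 0 (no attacks from
-- an off-board square), which is the intended value for an out-of-range input.
def D_get_knight_attack (position : Int) : Prop := 64 ≤ position ∧ position ≤ 80
instance (position : Int) : Decidable (D_get_knight_attack position) := by
  unfold D_get_knight_attack; infer_instance

def Spec_get_knight_attack (position : Int) (out : Int) : Prop :=
  ¬ D_get_knight_attack position → out = get_knight_attack_alt position
instance (position : Int) (out : Int) : Decidable (Spec_get_knight_attack position out) := by
  unfold Spec_get_knight_attack; infer_instance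

def pvDiffWitness_get_knight_attack : Int := 72
def pvDiffWitnessOut_get_knight_attack : Int × Int := (4791830003522207744, 0)

-- ===== CLAIM =====
def Claim_unchanged_get_knight_attack : Prop :=
  ∀ (position : Int), Dom_get_knight_attack position → Pre_get_knight_attack position →
    Spec_get_knight_attack position (get_knight_attack position)

def Claim_changed_get_knight_attack : Prop :=
  Dom_get_knight_attack (pvDiffWitness_get_knight_attack) ∧
  Pre_get_knight_attack (pvDiffWitness_get_knight_attack) ∧
  D_get_knight_attack (pvDiffWitness_get_knight_attack) ∧
  get_knight_attack (pvDiffWitness_get_knight_attack) = pvDiffWitnessOut_get_knight_attack.1 ∧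
  get_knight_attack_alt (pvDiffWitness_get_knight_attack) = pvDiffWitnessOut_get_knight_attack.2 ∧
  pvDiffWitnessOut_get_knight_attack.1 ≠ pvDiffWitnessOut_get_knight_attack.2

def Claim_exact_get_knight_attack : Prop :=
  ∀ (position : Int), Dom_get_knight_attack position → Pre_get_knight_attack position →
    D_get_knight_attack position → get_knight_attack position ≠ get_knight_attack_alt position

-- ===== LEMMAS AND PROOFS =====
theorem agree_on_board (p : Int) (h0 : 0 ≤ p) (h1 : p < 64) :
    get_knight_attack p = get_knight_attack_alt p := by
  interval_cases p <;> decide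

theorem a_zero_big (p : Int) (h : 81 ≤ p) : get_knight_attack p = 0 := by
  unfold get_knight_attack knightMovesA
  simp only [List.foldl_cons, List.foldl_nil]
  rw [if_neg (by omega), if_neg (by omega), if_neg (by omega), if_neg (by omega),
      if_neg (by omega), if_neg (by omega), if_neg (by omega), if_neg (by omega)]

theorem b_zero_big (p : Int) (h : 64 ≤ p) : get_knight_attack_alt p = 0 := by
  simp only [get_knight_attack_alt]
  split_ifs with hc
  · omega
  · rfl

-- ===== VERDICT =====
theorem get_knight_attack_spec : Claim_unchanged_get_knight_attack := by
  intro p _ hpre hnd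
  unfold D_get_knight_attack at hnd
  unfold Pre_get_knight_attack at hpre
  rcases lt_or_ge p 64 with h | h
  · exact agree_on_board p hpre h
  · rw [a_zero_big p (by omega), b_zero_big p (by omega)]

theorem get_knight_attack_changed : Claim_changed_get_knight_attack := by
  unfold Claim_changed_get_knight_attack; decide

theorem get_knight_attack_tight : Claim_exact_get_knight_attack := by
  intro p _ _ hd
  unfold D_get_knight_attack at hd
  obtain ⟨h1, h2⟩ := hd
  interval_cases p <;> decide
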